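-- pv_equiv track=rewrite | github.com/mpchouinard/Cryptography-Attack-Group-C | C2_Cipher_Attack/sat_attack_c2.py | load_key_concrete
-- ===== SOURCE A (Python) =====
-- def load_key_concrete(key_bits):
--     """
--     Simulate 64 key-loading cycles. key_bits[0] is the first bit sent.
--     Verilog: {sr[N-2:0], data_in} => new bit enters at index 0.
--     """
--     sr1 = [0] * 19
--     sr2 = [0] * 22
--     sr3 = [0] * 23
--     for cycle, bit in enumerate(key_bits):
--         b = int(bit)
--         if cycle < 19:
--             sr1 = [b] + sr1[:-1]
--         elif cycle < 41:
--             sr2 = [b] + sr2[:-1]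
--         else:
--             sr3 = [b] + sr3[:-1]
--     return sr1, sr2, sr3
-- ===== SOURCE B (Python) =====
-- def load_key_concrete(key_bits):
--     """
--     Simulate 64 key-loading cycles. key_bits[0] is the first bit sent.
--     Closed-form: each register is the reversed slice of key bits it receives,
--     padded with the zeros it started with; sr3 keeps only the last 23 bits entered.
--     """
--     bits = [int(b) for b in key_bits]
--     s1 = bits[0:19]
--     s2 = bits[19:41]
--     s3 = bits[41:][-23:]
--     sr1 = list(reversed(s1)) + [0] * (19 - len(s1))
--     sr2 = list(reversed(s2)) + [0] * (22 - len(s2))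
--     sr3 = list(reversed(s3)) + [0] * (23 - len(s3))
--     return sr1, sr2, sr3
-- ===== Notes on version B (the rewrite author's own statement) =====
-- stated objective: simpler
-- what changed: Replaces the 64-cycle shift-register simulation loop (which rebuilds a register list on every cycle) with closed-form slicing: each register is the reversed slice of the key bits it receives, padded with zeros; sr3 keeps only the last 23 bits entered.
import Mathlib
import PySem

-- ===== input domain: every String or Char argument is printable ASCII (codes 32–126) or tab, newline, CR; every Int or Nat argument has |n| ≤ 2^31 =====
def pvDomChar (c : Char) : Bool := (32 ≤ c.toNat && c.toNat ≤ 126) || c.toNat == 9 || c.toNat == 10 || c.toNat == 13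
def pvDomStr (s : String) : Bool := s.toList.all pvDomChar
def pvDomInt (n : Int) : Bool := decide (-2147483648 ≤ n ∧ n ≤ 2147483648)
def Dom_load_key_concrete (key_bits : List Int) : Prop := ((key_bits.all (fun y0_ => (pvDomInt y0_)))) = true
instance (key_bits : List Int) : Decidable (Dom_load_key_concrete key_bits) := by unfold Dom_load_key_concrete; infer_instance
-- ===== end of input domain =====

-- B replaces A's per-cycle shift-register simulation with closed-form slicing (simpler, one pass).

-- ===== PORT A =====
-- for cycle, bit in enumerate(key_bits): shift b into the register chosen by cycle
def load_key_concrete (key_bits : List Int) : List Int × List Int × List Int :=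
  (PySem.List.enumerate key_bits 0).foldl
    (fun st cb =>
      let b := cb.2          -- b = int(bit): identity on Int
      if cb.1 < 19 then ([b] ++ PySem.List.slice st.1 none (some (-1)), st.2.1, st.2.2)
      else if cb.1 < 41 then (st.1, [b] ++ PySem.List.slice st.2.1 none (some (-1)), st.2.2)
      else (st.1, st.2.1, [b] ++ PySem.List.slice st.2.2 none (some (-1))))
    (List.replicate 19 0, List.replicate 22 0, List.replicate 23 0)

-- ===== PORT B =====
def load_key_concrete_alt (key_bits : List Int) : List Int × List Int × List Int :=
  let bits := key_bits.map (fun b => b)   -- [int(b) for b in key_bits]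
  let s1 := PySem.List.slice bits (some 0) (some 19)
  let s2 := PySem.List.slice bits (some 19) (some 41)
  let s3 := PySem.List.slice (PySem.List.slice bits (some 41) none) (some (-23)) none
  (s1.reverse ++ List.replicate (19 - s1.length) 0,
   s2.reverse ++ List.replicate (22 - s2.length) 0,
   s3.reverse ++ List.replicate (23 - s3.length) 0)

-- ===== PRECONDITION & SPEC =====
def Spec_load_key_concrete (key_bits : List Int) (out : List Int × List Int × List Int) : Prop := out = load_key_concrete_alt key_bits
instance (key_bits : List Int) (out : List Int × List Int × List Int) : Decidable (Spec_load_key_concrete key_bits out) := by unfold Spec_load_key_concrete; infer_instance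

-- ===== CLAIM (what is proved, stated in full; the proofs are below) =====
def Claim_equal_load_key_concrete : Prop := ∀ (key_bits : List Int), Dom_load_key_concrete key_bits → Spec_load_key_concrete key_bits (load_key_concrete key_bits)

-- ===== LEMMAS AND PROOFS =====

-- B in drop/take normal form
lemma alt_eq (xs : List Int) :
    load_key_concrete_alt xs =
      ((xs.take 19).reverse ++ List.replicate (19 - (xs.take 19).length) 0,
       ((xs.drop 19).take 22).reverse ++ List.replicate (22 - ((xs.drop 19).take 22).length) 0,
       ((xs.drop 41).drop ((xs.drop 41).length - 23)).reverse ++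
         List.replicate (23 - ((xs.drop 41).drop ((xs.drop 41).length - 23)).length) 0) := by
  unfold load_key_concrete_alt
  simp only [List.map_id']
  rw [PySem.List.slice_zero_start,
    show (19:Int) = ((19:Nat):Int) by norm_num,
    show (41:Int) = ((41:Nat):Int) by norm_num,
    PySem.List.slice_to_natCast, PySem.List.slice_natCast, PySem.List.slice_from_natCast,
    PySem.List.slice_from_neg_ofNat _ 23 (by norm_num)]

-- shifting a bit into a register that still has a zero to spill
lemma sr_shift (v : List Int) (x : Int) (K : Nat) (h : v.length < K) :
    [x] ++ PySem.List.slice (v.reverse ++ List.replicate (K - v.length) 0) none (some (-1))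
      = (v ++ [x]).reverse ++ List.replicate (K - (v ++ [x]).length) 0 := by
  rw [PySem.List.slice_to_neg_one,
    show K - v.length = (K - (v.length + 1)) + 1 by omega,
    List.replicate_succ', ← List.append_assoc, List.dropLast_concat]
  simp [List.reverse_append]

-- shifting a bit into a full register: the oldest bit falls off
lemma sr_full_shift (w : List Int) (x : Int) (hw : w.length = 23) :
    [x] ++ PySem.List.slice (w.reverse ++ List.replicate (23 - w.length) 0) none (some (-1))
      = ((w.tail ++ [x]).reverse ++ List.replicate (23 - (w.tail ++ [x]).length) 0) := by
  have hlt : w.tail.length = 22 := by simp [hw]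
  simp [PySem.List.slice_to_neg_one, hw, hlt, List.dropLast_reverse, List.reverse_append]

lemma main_eq (xs : List Int) : load_key_concrete xs = load_key_concrete_alt xs := by
  induction xs using List.reverseRecOn with
  | nil => simp [load_key_concrete, alt_eq, PySem.List.enumerate]
  | append_singleton xs x ih =>
    have hstep : load_key_concrete (xs ++ [x]) =
        (let st := load_key_concrete xs
         if (xs.length : Int) < 19 then ([x] ++ PySem.List.slice st.1 none (some (-1)), st.2.1, st.2.2)
         else if (xs.length : Int) < 41 then (st.1, [x] ++ PySem.List.slice st.2.1 none (some (-1)), st.2.2)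
         else (st.1, st.2.1, [x] ++ PySem.List.slice st.2.2 none (some (-1)))) := by
      simp [load_key_concrete, PySem.List.enumerate_append, PySem.List.enumerate_cons,
        List.foldl_append]
    rw [hstep, ih, alt_eq xs, alt_eq (xs ++ [x])]
    by_cases h1 : xs.length < 19
    · rw [if_pos (by exact_mod_cast h1)]
      simp only [Prod.mk.injEq]
      refine ⟨?_, ?_, ?_⟩
      · rw [List.take_of_length_le (le_of_lt h1),
          List.take_of_length_le (by simp; omega)]
        exact sr_shift xs x 19 h1
      · rw [List.drop_eq_nil_of_le (show xs.length ≤ 19 by omega),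
          List.drop_eq_nil_of_le (show (xs ++ [x]).length ≤ 19 by simp; omega)]
      · rw [List.drop_eq_nil_of_le (show xs.length ≤ 41 by omega),
          List.drop_eq_nil_of_le (show (xs ++ [x]).length ≤ 41 by simp; omega)]
    · by_cases h2 : xs.length < 41
      · rw [if_neg (by exact_mod_cast h1), if_pos (by exact_mod_cast h2)]
        simp only [Prod.mk.injEq]
        have hdrop : (xs ++ [x]).drop 19 = xs.drop 19 ++ [x] :=
          List.drop_append_of_le_length (by omega)
        have hlen : (xs.drop 19).length = xs.length - 19 := List.length_drop
        refine ⟨?_, ?_, ?_⟩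
        · rw [List.take_append_of_le_length (by omega)]
        · rw [hdrop, List.take_of_length_le (by omega),
            List.take_of_length_le (by simp [hlen]; omega)]
          exact sr_shift (xs.drop 19) x 22 (by omega)
        · rw [List.drop_eq_nil_of_le (show xs.length ≤ 41 by omega),
            List.drop_eq_nil_of_le (show (xs ++ [x]).length ≤ 41 by simp; omega)]
      · rw [if_neg (by exact_mod_cast h1), if_neg (by exact_mod_cast h2)]
        simp only [Prod.mk.injEq]
        have hdrop : (xs ++ [x]).drop 19 = xs.drop 19 ++ [x] :=
          List.drop_append_of_le_length (by omega)
        have hdrop41 : (xs ++ [x]).drop 41 = xs.drop 41 ++ [x] :=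
          List.drop_append_of_le_length (by omega)
        have hlen41 : (xs.drop 41).length = xs.length - 41 := List.length_drop
        refine ⟨?_, ?_, ?_⟩
        · rw [List.take_append_of_le_length (by omega)]
        · rw [hdrop, List.take_append_of_le_length (by simp; omega)]
        · rw [hdrop41]
          by_cases h3 : xs.length - 41 < 23
          · rw [show (xs.drop 41).length - 23 = 0 by omega,
              show (xs.drop 41 ++ [x]).length - 23 = 0 by simp [hlen41]; omega,
              List.drop_zero, List.drop_zero]
            exact sr_shift (xs.drop 41) x 23 (by omega)
          · have hdd : (xs.drop 41 ++ [x]).drop ((xs.drop 41 ++ [x]).length - 23)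
                = ((xs.drop 41).drop ((xs.drop 41).length - 23)).tail ++ [x] := by
              rw [List.length_append, List.length_singleton,
                List.drop_append_of_le_length (by omega), List.tail_drop]
              congr 2
              omega
            rw [hdd]
            exact sr_full_shift ((xs.drop 41).drop ((xs.drop 41).length - 23)) x
              (by simp [hlen41]; omega)

-- ===== VERDICT (by name: the statement is the Claim_ definition above) =====
theorem load_key_concrete_spec : Claim_equal_load_key_concrete := by
  intro xs _
  exact main_eq xs
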